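-- pv_equiv track=rewrite | github.com/justinlietz93/Modular_Utilities | advanced_chunking/application/chunking_service.py | _chunk_by_line
-- ===== SOURCE A (Python) =====
-- from typing import List
--
-- def _chunk_by_line(text: str) -> List[tuple[str, int, int]]:
--     """Chunk text by lines.
--
--     Returns:
--         List of tuples (chunk_text, start_pos, end_pos)
--     """
--     lines = text.split("\n")
--     chunks = []
--     pos = 0
--
--     for line in lines:
--         if line.strip():  # Skip empty lines
--             start = pos
--             end = pos + len(line)
--             chunks.append((line, start, end))
--         pos += len(line) + 1  # +1 for newline
--
--     return chunks
-- ===== SOURCE B (Python) =====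
-- import re
-- from typing import List
--
--
-- def _chunk_by_line(text: str) -> List[tuple[str, int, int]]:
--     """Chunk text by lines via position-bearing regex matching.
--
--     Returns:
--         List of tuples (chunk_text, start_pos, end_pos)
--     """
--     return [
--         (m.group(), m.start(), m.end())
--         for m in re.finditer(r"[^\n]+", text)
--         if m.group().strip()
--     ]
-- ===== Notes on version B (the rewrite author's own statement) =====
-- stated objective: idiomatic
-- what changed: Replaces newline-splitting plus a running position accumulator with re.finditer over maximal newline-free runs, taking positions directly from each match's start()/end().
import Mathlib
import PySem

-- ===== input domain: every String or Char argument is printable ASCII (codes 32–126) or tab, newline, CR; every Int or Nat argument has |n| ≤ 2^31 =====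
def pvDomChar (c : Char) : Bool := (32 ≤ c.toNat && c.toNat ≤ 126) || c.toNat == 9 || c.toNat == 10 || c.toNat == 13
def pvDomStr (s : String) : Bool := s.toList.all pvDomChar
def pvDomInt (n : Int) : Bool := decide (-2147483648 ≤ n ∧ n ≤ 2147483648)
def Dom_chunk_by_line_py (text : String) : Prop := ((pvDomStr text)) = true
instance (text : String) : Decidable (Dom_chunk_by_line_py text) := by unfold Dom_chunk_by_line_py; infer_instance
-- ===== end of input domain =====

-- B replaces split("\n") plus a running position accumulator with regex-style scanning for
-- maximal newline-free runs that carry their own start/end positions (objective: idiomatic).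

-- ===== PORT A =====
-- lines = text.split("\n"); for line in lines: …  with (chunks, pos) state
def chunk_by_line_py (text : String) : List (String × Int × Int) :=
  let lines := PySem.Chars.splitOn text.toList ['\n']
  (lines.foldl
    (fun (st : List (String × Int × Int) × Int) line =>
      let chunks := st.1
      let pos := st.2
      let chunks :=
        if PySem.Chars.strip line ≠ [] then
          chunks ++ [(String.ofList line, pos, pos + PySem.Chars.len line)]
        else chunks
      (chunks, pos + PySem.Chars.len line + 1))
    ([], 0)).1

-- ===== PORT B =====
-- model of re.finditer(r"[^\n]+", text): the maximal newline-free runs with match start/end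
def pvFindRuns : List Char → Nat → List (List Char × Nat × Nat)
  | [], _ => []
  | c :: cs, i =>
    if ¬c = '\n' then
      let run := (c :: cs).takeWhile (fun ch => ¬ch = '\n')
      (run, i, i + run.length) :: pvFindRuns (cs.dropWhile (fun ch => ¬ch = '\n')) (i + run.length)
    else pvFindRuns cs (i + 1)
  termination_by l => l.length
  decreasing_by
    · have := List.length_dropWhile_le (fun ch => decide ¬ch = '\n') cs
      simp only [List.length_cons]
      omega
    · simp

-- [(m.group(), m.start(), m.end()) for m in finditer if m.group().strip()]
def chunk_by_line_py_alt (text : String) : List (String × Int × Int) :=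
  (pvFindRuns text.toList 0).filterMap (fun m =>
    if PySem.Chars.strip m.1 ≠ [] then
      some (String.ofList m.1, (m.2.1 : Int), (m.2.2 : Int))
    else none)

-- ===== PRECONDITION & SPEC =====
def Spec_chunk_by_line_py (text : String) (out : List (String × Int × Int)) : Prop := out = chunk_by_line_py_alt text
instance (text : String) (out : List (String × Int × Int)) : Decidable (Spec_chunk_by_line_py text out) := by unfold Spec_chunk_by_line_py; infer_instance

-- ===== CLAIM (what is proved, stated in full; the proofs are below) =====
def Claim_equal_chunk_by_line_py : Prop := ∀ (text : String), Dom_chunk_by_line_py text → Spec_chunk_by_line_py text (chunk_by_line_py text)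

-- ===== LEMMAS AND PROOFS =====

-- the lines of l when split on '\n' (specification of splitOn for this separator)
def pvLines (l : List Char) : List (List Char) :=
  match h : l.dropWhile (fun ch => ¬ch = '\n') with
  | [] => [l.takeWhile (fun ch => ¬ch = '\n')]
  | _ :: rest => l.takeWhile (fun ch => ¬ch = '\n') :: pvLines rest
  termination_by l.length
  decreasing_by
    have h1 := List.length_dropWhile_le (fun ch => decide ¬ch = '\n') l
    rw [h] at h1; simp at h1; omega

lemma pvLines_nil : pvLines [] = [[]] := by
  rw [pvLines]; split <;> simp_all

def pvConsHead (x : List Char) : List (List Char) → List (List Char)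
  | [] => [x]
  | y :: ys => (x ++ y) :: ys

lemma pvLines_ne_nil (l : List Char) : pvLines l ≠ [] := by
  rw [pvLines]
  split <;> simp

lemma pvConsHead_nil (L : List (List Char)) (h : L ≠ []) : pvConsHead [] L = L := by
  cases L with
  | nil => exact absurd rfl h
  | cons y ys => simp [pvConsHead]

lemma pvConsHead_consHead (x c : List Char) (L : List (List Char)) :
    pvConsHead x (pvConsHead c L) = pvConsHead (x ++ c) L := by
  cases L <;> simp [pvConsHead]

lemma pvLines_newline (rest : List Char) : pvLines ('\n' :: rest) = [] :: pvLines rest := by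
  rw [pvLines]
  split <;> simp_all [List.dropWhile_cons, List.takeWhile_cons]

lemma pvLines_cons (c : Char) (rest : List Char) (hc : ¬c = '\n') :
    pvLines (c :: rest) = pvConsHead [c] (pvLines rest) := by
  rw [pvLines, pvLines]
  have hcb : (decide ¬c = '\n') = true := by simp [hc]
  split
  next heq1 =>
    rw [List.dropWhile_cons, hcb, if_pos rfl] at heq1
    split
    next heq2 => simp [List.takeWhile_cons, hc, pvConsHead]
    next head tail heq2 => rw [heq1] at heq2; cases heq2
  next head tail heq1 =>
    rw [List.dropWhile_cons, hcb, if_pos rfl] at heq1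
    split
    next heq2 => rw [heq1] at heq2; cases heq2
    next head' tail' heq2 =>
      rw [heq1] at heq2
      cases heq2
      simp [List.takeWhile_cons, hc, pvConsHead]

lemma pv_go_spec (fuel : Nat) : ∀ (l cur : List Char) (acc : List (List Char)),
    l.length ≤ fuel →
    PySem.Chars.splitOn.go ['\n'] fuel l cur acc
      = acc.reverse ++ pvConsHead cur.reverse (pvLines l) := by
  induction fuel with
  | zero =>
    intro l cur acc h
    have hl : l = [] := by cases l <;> simp_all
    subst hl
    simp [PySem.Chars.splitOn.go, pvLines_nil, pvConsHead]
  | succ fuel ih =>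
    intro l cur acc h
    cases l with
    | nil => simp [PySem.Chars.splitOn.go, pvLines_nil, pvConsHead]
    | cons c rest =>
      rw [PySem.Chars.splitOn.go]
      by_cases hc : c = '\n'
      · subst hc
        have hpre : List.isPrefixOf ['\n'] ('\n' :: rest) = true := by
          simp [List.isPrefixOf]
        rw [if_pos hpre]
        have hdrop : List.drop (List.length ['\n']) ('\n' :: rest) = rest := by simp
        rw [hdrop, ih rest [] (cur.reverse :: acc) (by simp at h; omega)]
        rw [pvLines_newline]
        cases hL : pvLines rest with
        | nil => exact absurd hL (pvLines_ne_nil rest)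
        | cons y ys => simp [pvConsHead]
      · have hpre : List.isPrefixOf ['\n'] (c :: rest) = false := by
          simp [List.isPrefixOf]; exact fun hh => absurd hh.symm hc
        rw [if_neg (by simp [hpre])]
        rw [ih rest (c :: cur) acc (by simp at h; omega)]
        rw [pvLines_cons c rest hc, pvConsHead_consHead]
        simp

lemma pv_splitOn_eq (l : List Char) :
    PySem.Chars.splitOn l ['\n'] = pvLines l := by
  rw [PySem.Chars.splitOn, pv_go_spec (l.length + 1) l [] [] (by omega)]
  simp [pvConsHead_nil _ (pvLines_ne_nil l)]

-- the per-match filter of port B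
def pvFilt (m : List Char × Nat × Nat) : Option (String × Int × Int) :=
  if PySem.Chars.strip m.1 ≠ [] then
    some (String.ofList m.1, (m.2.1 : Int), (m.2.2 : Int))
  else none

lemma pv_tdw_nil {α : Type} (p : α → Bool) (l : List α)
    (h : l.dropWhile p = []) : l.takeWhile p = l := by
  have := List.takeWhile_append_dropWhile (p := p) (l := l)
  rw [h] at this; simpa using this

lemma pv_head_dw {α : Type} (p : α → Bool) (l : List α) (d : α) (rest : List α)
    (h : l.dropWhile p = d :: rest) : p d = false := by
  induction l with
  | nil => simp at h
  | cons a l ih =>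
    rw [List.dropWhile_cons] at h
    by_cases hp : p a = true
    · rw [if_pos hp] at h; exact ih h
    · rw [if_neg hp] at h
      cases h
      simpa using hp

lemma pv_len_tdw {α : Type} (p : α → Bool) (l : List α) (d : α) (rest : List α)
    (h : l.dropWhile p = d :: rest) :
    l.length = (l.takeWhile p).length + 1 + rest.length := by
  have := List.takeWhile_append_dropWhile (p := p) (l := l)
  rw [h] at this
  calc l.length = ((l.takeWhile p) ++ d :: rest).length := by rw [this]
  _ = _ := by simp; omega

lemma pv_strip_nil : PySem.Chars.strip ([] : List Char) = [] := by
  simp [PySem.Chars.strip, PySem.Chars.lstrip, PySem.Chars.rstrip]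

lemma pv_fold_runs (n : Nat) : ∀ (l : List Char), l.length ≤ n →
    ∀ (p : Nat) (acc : List (String × Int × Int)),
    (pvLines l).foldl
      (fun (st : List (String × Int × Int) × Int) line =>
        ((if PySem.Chars.strip line ≠ [] then
            st.1 ++ [(String.ofList line, st.2, st.2 + PySem.Chars.len line)]
          else st.1),
         st.2 + PySem.Chars.len line + 1))
      (acc, (p : Int))
    = (acc ++ (pvFindRuns l p).filterMap pvFilt, ((p : Int) + l.length + 1)) := by
  induction n with
  | zero =>
    intro l hl p acc
    have : l = [] := by cases l <;> simp_all
    subst this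
    rw [pvLines_nil]
    simp [pvFindRuns, pv_strip_nil, PySem.Chars.len]
  | succ n ih =>
    intro l hl p acc
    rw [pvLines]
    split
    next hdw =>
      rw [pv_tdw_nil _ l hdw]
      cases l with
      | nil =>
        simp [pvFindRuns, pv_strip_nil, PySem.Chars.len]
      | cons c cs =>
        have hc : ¬c = '\n' := by
          intro hceq; subst hceq; simp [List.dropWhile_cons] at hdw
        have hdw0 : List.dropWhile (fun ch => decide ¬ch = '\n') cs = [] := by
          simpa [List.dropWhile_cons, hc] using hdw
        have htw : List.takeWhile (fun ch => decide ¬ch = '\n') (c :: cs) = c :: cs :=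
          pv_tdw_nil _ _ hdw
        simp only [pvFindRuns]
        rw [if_pos hc, htw, hdw0]
        simp only [pvFindRuns, List.filterMap_cons, List.filterMap_nil, List.foldl_cons,
          List.foldl_nil, pvFilt, PySem.Chars.len_eq]
        split <;> push_cast <;> simp
    next d rest hdl =>
      have hd : d = '\n' := by
        have := pv_head_dw _ l d rest hdl
        simpa using this
      subst hd
      simp only [List.foldl_cons]
      have hlen := pv_len_tdw _ l '\n' rest hdl
      have hrest : rest.length ≤ n := by omega
      have step :
          ((p : Int) + PySem.Chars.len (l.takeWhile (fun ch => decide ¬ch = '\n')) + 1)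
            = (((p + (l.takeWhile (fun ch => decide ¬ch = '\n')).length + 1 : Nat)) : Int) := by
        simp only [PySem.Chars.len_eq]; push_cast; ring
      rw [step, ih rest hrest (p + (l.takeWhile (fun ch => decide ¬ch = '\n')).length + 1) _]
      have hruns : (pvFindRuns l p).filterMap pvFilt
          = (if PySem.Chars.strip (l.takeWhile (fun ch => decide ¬ch = '\n')) ≠ [] then
              [(String.ofList (l.takeWhile (fun ch => decide ¬ch = '\n')), (p : Int),
                 ((p + (l.takeWhile (fun ch => decide ¬ch = '\n')).length : Nat) : Int))]
             else [])
            ++ (pvFindRuns rest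
                  (p + (l.takeWhile (fun ch => decide ¬ch = '\n')).length + 1)).filterMap pvFilt := by
        cases l with
        | nil => simp at hdl
        | cons c cs =>
          by_cases hc : c = '\n'
          · subst hc
            have hcs : cs = rest := by
              have h' : '\n' :: cs = '\n' :: rest := by
                simpa [List.dropWhile_cons] using hdl
              have := congrArg List.tail h'
              simpa using this
            subst hcs
            simp only [pvFindRuns]
            rw [if_neg (by simp)]
            simp [List.takeWhile_cons, pv_strip_nil]
          · have hdw1 : List.dropWhile (fun ch => decide ¬ch = '\n') cs = '\n' :: rest := by
              simpa [List.dropWhile_cons, hc] using hdl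
            have htw1 : List.takeWhile (fun ch => decide ¬ch = '\n') (c :: cs)
                = c :: List.takeWhile (fun ch => decide ¬ch = '\n') cs := by
              simp [List.takeWhile_cons, hc]
            simp only [pvFindRuns]
            rw [if_pos hc, hdw1]
            simp only [pvFindRuns]
            rw [if_neg (by simp)]
            simp only [htw1, List.filterMap_cons, pvFilt]
            by_cases hs : PySem.Chars.strip
                (c :: List.takeWhile (fun ch => !decide (ch = '\n')) cs) = [] <;>
              simp [hs]
      rw [hruns]
      refine Prod.ext ?_ ?_
      · split <;> simp [PySem.Chars.len_eq, List.append_assoc]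
      · simp only [PySem.Chars.len_eq]
        push_cast
        omega

-- ===== VERDICT (by name: the statement is the Claim_ definition above) =====
theorem chunk_by_line_py_spec : Claim_equal_chunk_by_line_py := by
  intro text _
  unfold Spec_chunk_by_line_py chunk_by_line_py chunk_by_line_py_alt
  rw [pv_splitOn_eq]
  have hfr := pv_fold_runs text.toList.length text.toList le_rfl 0 []
  simp only [Nat.cast_zero] at hfr
  simp only [hfr]
  simp [pvFilt]
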